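-- pv_equiv track=rewrite | github.com/rprusak/Advent-of-code-2018 | 13/main.py | remove_carts
-- ===== SOURCE A (Python) =====
-- from typing import List
--
-- def remove_carts(paths_map: List[str]) -> List[str]:
--     result = []
--     for line in paths_map:
--         line = line.replace(">", "-")
--         line = line.replace("<", "-")
--         line = line.replace("^", "|")
--         line = line.replace("v", "|")
--         result.append(line)
--
--     return result
-- ===== SOURCE B (Python) =====
-- from typing import List
--
-- _TABLE = {">": "-", "<": "-", "^": "|", "v": "|"}
--
-- def remove_carts(paths_map: List[str]) -> List[str]:
--     return ["".join(_TABLE.get(c, c) for c in line) for line in paths_map]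
-- ===== Notes on version B (the rewrite author's own statement) =====
-- stated objective: idiomatic
-- what changed: Replaces four sequential full-string .replace scans per line with a single character-level pass over a translation table built once.
import Mathlib
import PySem

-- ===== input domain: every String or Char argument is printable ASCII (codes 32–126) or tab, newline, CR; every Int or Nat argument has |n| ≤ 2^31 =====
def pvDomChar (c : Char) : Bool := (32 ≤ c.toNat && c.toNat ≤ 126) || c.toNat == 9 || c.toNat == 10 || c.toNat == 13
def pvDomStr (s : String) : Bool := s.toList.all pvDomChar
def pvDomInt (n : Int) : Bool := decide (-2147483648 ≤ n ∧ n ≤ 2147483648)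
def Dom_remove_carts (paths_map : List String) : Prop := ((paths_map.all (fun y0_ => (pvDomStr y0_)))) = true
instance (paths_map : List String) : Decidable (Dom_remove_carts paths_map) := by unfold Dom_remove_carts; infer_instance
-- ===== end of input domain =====

-- B replaces A's four sequential full-string replace scans per line with one
-- character-level pass over a translation table (idiomatic; same return value).


-- ===== PORT A =====
-- A: for each line, apply four sequential str.replace passes, append to result.
def remove_carts (paths_map : List String) : List String :=
  paths_map.foldl (fun result line =>
    let line := PySem.Str.replace line ">" "-"
    let line := PySem.Str.replace line "<" "-"
    let line := PySem.Str.replace line "^" "|"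
    let line := PySem.Str.replace line "v" "|"
    result ++ [line]) []

-- ===== PORT B =====
-- B's translation table, a dict built once.
def pvTable : PySem.Dict Char Char :=
  PySem.Dict.ofList [('>', '-'), ('<', '-'), ('^', '|'), ('v', '|')]

-- ''.join(_TABLE.get(c, c) for c in line)
def pvTranslate (line : String) : String :=
  String.ofList (line.toList.map (fun c => (PySem.Dict.get? pvTable c).getD c))

def remove_carts_alt (paths_map : List String) : List String :=
  paths_map.map pvTranslate

-- ===== PRECONDITION & SPEC =====
def Spec_remove_carts (paths_map : List String) (out : List String) : Prop := out = remove_carts_alt paths_map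
instance (paths_map : List String) (out : List String) : Decidable (Spec_remove_carts paths_map out) := by unfold Spec_remove_carts; infer_instance

-- ===== CLAIM (what is proved, stated in full; the proofs are below) =====
def Claim_equal_remove_carts : Prop := ∀ (paths_map : List String), Dom_remove_carts paths_map → Spec_remove_carts paths_map (remove_carts paths_map)

-- ===== LEMMAS AND PROOFS =====

-- single-character replace is a character map
theorem replace_go_single (a b : Char) :
    ∀ (l : List Char) (fuel : Nat) (acc : List Char), l.length ≤ fuel →
      PySem.Chars.replace.go [a] [b] fuel l acc
        = acc.reverse ++ l.map (fun c => if c = a then b else c) := by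
  intro l
  induction l with
  | nil =>
    intro fuel acc _
    cases fuel <;> simp [PySem.Chars.replace.go]
  | cons c t ih =>
    intro fuel acc hle
    cases fuel with
    | zero => simp at hle
    | succ n =>
      simp only [PySem.Chars.replace.go]
      by_cases hca : c = a
      · have hpre : List.isPrefixOf [a] (c :: t) = true := by
          simp [List.isPrefixOf, hca]
        simp only [hpre, if_true, List.reverse_singleton, List.length, List.drop]
        rw [show ([b] : List Char) = [b] from rfl, ih n ([b] ++ acc) (by simpa using Nat.le_of_succ_le_succ hle)]
        simp [hca]
      · have hpre : List.isPrefixOf [a] (c :: t) = false := by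
          simp [List.isPrefixOf]
          exact fun h => (hca h.symm).elim
        simp only [hpre]
        rw [if_neg (by simp [hpre])]
        rw [ih n (c :: acc) (by simpa using Nat.le_of_succ_le_succ hle)]
        simp [hca]

theorem replace_single (s old new : String) (a b : Char)
    (ho : old.toList = [a]) (hn : new.toList = [b]) :
    PySem.Str.replace s old new
      = String.ofList (s.toList.map (fun c => if c = a then b else c)) := by
  simp only [PySem.Str.replace, PySem.Chars.replace, ho, hn]
  rw [if_neg (by simp [List.isEmpty])]
  rw [replace_go_single a b s.toList s.toList.length [] le_rfl]
  simp

theorem line_eq (x : String) :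
    PySem.Str.replace (PySem.Str.replace (PySem.Str.replace
      (PySem.Str.replace x ">" "-") "<" "-") "^" "|") "v" "|" = pvTranslate x := by
  rw [replace_single _ _ _ 'v' '|' (by decide) (by decide),
      replace_single _ _ _ '^' '|' (by decide) (by decide),
      replace_single _ _ _ '<' '-' (by decide) (by decide),
      replace_single _ _ _ '>' '-' (by decide) (by decide)]
  unfold pvTranslate
  refine congrArg String.ofList ?_
  simp only [String.toList_ofList, List.map_map]
  apply List.map_congr_left
  intro c _
  have hitems : pvTable.items = [('>', '-'), ('<', '-'), ('^', '|'), ('v', '|')] := by decide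
  simp only [Function.comp, PySem.Dict.get?, hitems, List.find?]
  cases h1 : ('>' == c) <;> cases h2 : ('<' == c) <;> cases h3 : ('^' == c) <;>
    cases h4 : ('v' == c) <;> simp_all [beq_iff_eq]
  all_goals first
    | (subst_vars; simp_all)
    | (have n1 : c ≠ '>' := fun h => h1 h.symm
       have n2 : c ≠ '<' := fun h => h2 h.symm
       have n3 : c ≠ '^' := fun h => h3 h.symm
       have n4 : c ≠ 'v' := fun h => h4 h.symm
       simp [n1, n2, n3, n4])

theorem remove_carts_spec : Claim_equal_remove_carts := by
  intro paths_map hd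
  clear hd
  unfold Spec_remove_carts remove_carts remove_carts_alt
  induction paths_map using List.reverseRecOn with
  | nil => rfl
  | append_singleton xs x ih =>
    rw [List.foldl_append, List.map_append, ← ih]
    simp only [List.foldl, line_eq]
    simp
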